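-- pv_equiv track=rewrite | github.com/Maxvolk15/mtuci_labs | SIAOD/lab3/5_Events.py | greedy_schedule
-- ===== SOURCE A (Python) =====
-- days_order = ["Monday", "Tuesday", "Wednesday", "Thursday", "Friday", "Saturday", "Sunday"]
--
-- def to_minutes(t):
--     return t[0] * 60 + t[1]
--
-- def greedy_schedule(events):
--     selected_events = []
--     schedule_by_day = {}
--
--     for day in days_order:
--         day_events = [event for event in events if event[1] == day]
--
--         day_events.sort(key=lambda event: to_minutes(event[3]))
--
--         chosen_for_day = []
--         current_end = to_minutes((8, 0))
--
--         for event in day_events: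
--             title, event_day, start, end, description = event
--             start_minutes = to_minutes(start)
--             end_minutes = to_minutes(end)
--
--             if start_minutes < to_minutes((8, 0)):
--                 continue
--             if end_minutes > to_minutes((18, 0)):
--                 continue
--
--             if start_minutes >= current_end:
--                 chosen_for_day.append(event)
--                 current_end = end_minutes
--
--         if chosen_for_day:
--             schedule_by_day[day] = chosen_for_day
--             selected_events.extend(chosen_for_day)
--
--     return selected_events, schedule_by_day
-- ===== SOURCE B (Python) =====
-- days_order = ["Monday", "Tuesday", "Wednesday", "Thursday", "Friday", "Saturday", "Sunday"]
--
-- def to_minutes(t):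
--     return t[0] * 60 + t[1]
--
-- def greedy_schedule(events):
--     # One global stable sort by end time and ONE greedy pass over all events,
--     # keeping a per-day current-end dictionary, instead of seven per-day
--     # filter+sort+greedy loops.
--     valid_days = set(days_order)
--     ends = {}
--     buckets = {}
--     for e in sorted(events, key=lambda ev: to_minutes(ev[3])):
--         day = e[1]
--         if day in valid_days and to_minutes(e[2]) >= 480 \
--                 and to_minutes(e[3]) <= 1080 \
--                 and to_minutes(e[2]) >= ends.get(day, 480):
--             buckets.setdefault(day, []).append(e)
--             ends[day] = to_minutes(e[3])
--     selected_events = [e for day in days_order for e in buckets.get(day, [])]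
--     schedule_by_day = {day: buckets[day] for day in days_order if buckets.get(day, [])}
--     return selected_events, schedule_by_day
-- ===== Notes on version B (the rewrite author's own statement) =====
-- stated objective: alternative
-- what changed: B replaces A's seven per-weekday filter+sort+greedy loops by one global stable sort of all events by end time followed by a single greedy pass that maintains a per-day current-end dictionary, assembling selected_events and schedule_by_day from the resulting buckets at the end.
import Mathlib
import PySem

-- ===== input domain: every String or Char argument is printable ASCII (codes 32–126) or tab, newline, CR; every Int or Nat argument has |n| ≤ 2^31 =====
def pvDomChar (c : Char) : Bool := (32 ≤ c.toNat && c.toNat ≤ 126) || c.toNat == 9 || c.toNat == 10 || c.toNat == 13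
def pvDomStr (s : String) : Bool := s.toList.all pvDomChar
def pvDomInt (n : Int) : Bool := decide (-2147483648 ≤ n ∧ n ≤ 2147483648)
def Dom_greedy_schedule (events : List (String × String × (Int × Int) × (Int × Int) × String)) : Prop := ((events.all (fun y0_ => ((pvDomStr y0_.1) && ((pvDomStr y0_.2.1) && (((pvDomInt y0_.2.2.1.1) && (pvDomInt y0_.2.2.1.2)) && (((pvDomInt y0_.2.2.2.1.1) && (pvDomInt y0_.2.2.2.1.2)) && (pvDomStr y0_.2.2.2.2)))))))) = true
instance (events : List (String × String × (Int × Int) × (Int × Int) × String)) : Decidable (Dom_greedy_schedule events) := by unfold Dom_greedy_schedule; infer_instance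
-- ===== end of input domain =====

-- B replaces A's seven per-weekday filter+sort+greedy loops by ONE global stable sort of all
-- events by end time followed by ONE greedy pass maintaining a per-day current-end dictionary
-- (objective: alternative single-pass decomposition, same asymptotic cost).

abbrev Ev := String × String × (Int × Int) × (Int × Int) × String

def days_order : List String :=
  ["Monday", "Tuesday", "Wednesday", "Thursday", "Friday", "Saturday", "Sunday"]

def to_minutes (t : Int × Int) : Int := t.1 * 60 + t.2

-- ===== PORT A =====
-- A's inner greedy loop body, named (the three guarded branches, in A's order)
def innerStepA (st : List Ev × Int) (event : Ev) : List Ev × Int :=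
  if to_minutes event.2.2.1 < to_minutes (8, 0) then st
  else if to_minutes event.2.2.2.1 > to_minutes (18, 0) then st
  else if to_minutes event.2.2.1 ≥ st.2 then (st.1 ++ [event], to_minutes event.2.2.2.1)
  else st

def greedy_schedule (events : List (String × String × (Int × Int) × (Int × Int) × String)) : (List (String × String × (Int × Int) × (Int × Int) × String)) × (List (String × List (String × String × (Int × Int) × (Int × Int) × String))) :=
  let res := days_order.foldl
    (fun (acc : List Ev × PySem.Dict String (List Ev)) day =>
      let day_events := events.filter (fun event => event.2.1 == day)
      let day_events := PySem.List.sorted day_events (fun event => to_minutes event.2.2.2.1) false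
      let chosen_for_day := (day_events.foldl innerStepA ([], to_minutes (8, 0))).1
      if chosen_for_day ≠ [] then
        (acc.1 ++ chosen_for_day, acc.2.insert day chosen_for_day)
      else acc)
    (([] : List Ev), (PySem.Dict.empty : PySem.Dict String (List Ev)))
  (res.1, res.2.items)

-- ===== PORT B =====
-- B's single-pass loop body: the per-day current-end dict and the per-day buckets
def passStep (valid : PySem.Set String)
    (st : PySem.Dict String Int × PySem.Dict String (List Ev)) (e : Ev) :
    PySem.Dict String Int × PySem.Dict String (List Ev) :=
  if e.2.1 ∈ valid ∧ 480 ≤ to_minutes e.2.2.1 ∧ to_minutes e.2.2.2.1 ≤ 1080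
      ∧ st.1.getD e.2.1 480 ≤ to_minutes e.2.2.1 then
    (st.1.insert e.2.1 (to_minutes e.2.2.2.1), st.2.modify e.2.1 [] (· ++ [e]))
  else st

def greedy_schedule_alt (events : List (String × String × (Int × Int) × (Int × Int) × String)) : (List (String × String × (Int × Int) × (Int × Int) × String)) × (List (String × List (String × String × (Int × Int) × (Int × Int) × String))) :=
  let valid_days := PySem.Set.ofList days_order
  let res := (PySem.List.sorted events (fun ev => to_minutes ev.2.2.2.1) false).foldl
    (passStep valid_days) (PySem.Dict.empty, PySem.Dict.empty)
  let buckets := res.2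
  (days_order.flatMap (fun day => buckets.getD day []),
   (days_order.foldl
      (fun (sch : PySem.Dict String (List Ev)) day =>
        if buckets.getD day [] ≠ [] then sch.insert day (buckets.getD day []) else sch)
      PySem.Dict.empty).items)

-- ===== PRECONDITION & SPEC =====
def Spec_greedy_schedule (events : List (String × String × (Int × Int) × (Int × Int) × String)) (out : (List (String × String × (Int × Int) × (Int × Int) × String)) × (List (String × List (String × String × (Int × Int) × (Int × Int) × String)))) : Prop := out = greedy_schedule_alt events
instance (events : List (String × String × (Int × Int) × (Int × Int) × String)) (out : (List (String × String × (Int × Int) × (Int × Int) × String)) × (List (String × List (String × String × (Int × Int) × (Int × Int) × String)))) : Decidable (Spec_greedy_schedule events out) := by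
  unfold Spec_greedy_schedule
  letI : DecidableEq (List (String × String × (Int × Int) × (Int × Int) × String)) :=
    fun x y => List.hasDecEq x y
  letI : DecidableEq (List (String × List (String × String × (Int × Int) × (Int × Int) × String))) :=
    fun x y => List.hasDecEq x y
  infer_instance

-- ===== CLAIM (what is proved, stated in full; the proofs are below) =====
def Claim_equal_greedy_schedule : Prop := ∀ (events : List (String × String × (Int × Int) × (Int × Int) × String)), Dom_greedy_schedule events → Spec_greedy_schedule events (greedy_schedule events)

-- ===== LEMMAS AND PROOFS =====

-- the greedy step both loops perform on one day's state, in one guarded form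
def oneDay (st : List Ev × Int) (e : Ev) : List Ev × Int :=
  if 480 ≤ to_minutes e.2.2.1 ∧ to_minutes e.2.2.2.1 ≤ 1080 ∧ st.2 ≤ to_minutes e.2.2.1 then
    (st.1 ++ [e], to_minutes e.2.2.2.1)
  else st

-- what A computes for one day
def chosenFor (events : List Ev) (day : String) : List Ev :=
  ((PySem.List.sorted (events.filter (fun event => event.2.1 == day))
      (fun event => to_minutes event.2.2.2.1) false).foldl oneDay ([], 480)).1

lemma innerStepA_eq : innerStepA = oneDay := by
  funext st e
  simp only [innerStepA, oneDay, to_minutes]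
  split_ifs <;> first | rfl | omega

-- A's outer loop, with the per-day work abstracted as c
lemma fold_pair (c : String → List Ev) (days : List String) (sel : List Ev)
    (d : PySem.Dict String (List Ev)) :
    days.foldl (fun acc day =>
        if c day ≠ [] then (acc.1 ++ c day, acc.2.insert day (c day)) else acc) (sel, d)
      = (sel ++ days.flatMap c,
         days.foldl (fun sch day => if c day ≠ [] then sch.insert day (c day) else sch) d) := by
  induction days generalizing sel d with
  | nil => simp
  | cons day days ih =>
    rw [List.foldl_cons, List.foldl_cons, List.flatMap_cons]
    by_cases h : c day = []
    · rw [if_neg (by simp [h]), if_neg (by simp [h]), ih, h, List.nil_append]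
    · rw [if_pos h, if_pos h, ih, List.append_assoc]

-- inserting an element that sorts before the whole list puts it in front
lemma insertBy_all_before {α : Type} (before : α → α → Bool) (x : α) (l : List α)
    (h : ∀ z ∈ l, before x z = true) :
    PySem.List.insertBy before x l = x :: l := by
  cases l with
  | nil => rfl
  | cons y ys => simp [PySem.List.insertBy, h y (by simp)]

-- filtering commutes with a stable insertion into a sorted list: kept element
lemma filter_insertBy_pos {α κ : Type} [LinearOrder κ] (key : α → κ) (p : α → Bool)
    (x : α) (l : List α) (hs : l.Pairwise (fun a b => key a ≤ key b)) (hx : p x = true) :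
    (PySem.List.insertBy (fun a b => decide (key a < key b)) x l).filter p
      = PySem.List.insertBy (fun a b => decide (key a < key b)) x (l.filter p) := by
  induction l with
  | nil => simp [PySem.List.insertBy, hx]
  | cons y t ih =>
    have hs' : t.Pairwise (fun a b => key a ≤ key b) := hs.of_cons
    by_cases hb : key x < key y
    · simp only [PySem.List.insertBy, decide_eq_true_eq, if_pos hb, List.filter_cons]
      by_cases hy : p y = true
      · simp [hx, hy, PySem.List.insertBy, hb]
      · simp only [hx, hy, Bool.false_eq_true, if_false, if_true]
        rw [insertBy_all_before]
        intro z hz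
        have hz' : z ∈ t := List.mem_of_mem_filter hz
        have : key y ≤ key z := (List.pairwise_cons.mp hs).1 z hz'
        simp [lt_of_lt_of_le hb this]
    · simp only [PySem.List.insertBy, decide_eq_true_eq, if_neg hb, List.filter_cons]
      by_cases hy : p y = true
      · simp [hy, PySem.List.insertBy, hb, ih hs']
      · simp [hy, ih hs']

-- filtering commutes with a stable insertion: dropped element
lemma filter_insertBy_neg {α κ : Type} [LinearOrder κ] (key : α → κ) (p : α → Bool)
    (x : α) (l : List α) (hx : p x = false) :
    (PySem.List.insertBy (fun a b => decide (key a < key b)) x l).filter p = l.filter p := by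
  induction l with
  | nil => simp [PySem.List.insertBy, hx]
  | cons y t ih =>
    by_cases hb : key x < key y
    · simp [PySem.List.insertBy, hb, List.filter_cons, hx]
    · simp only [PySem.List.insertBy, decide_eq_true_eq, if_neg hb, List.filter_cons]
      by_cases hy : p y = true <;> simp [hy, ih]

-- a stable sort commutes with filtering
lemma filter_sorted {α κ : Type} [LinearOrder κ] (key : α → κ) (p : α → Bool) (xs : List α) :
    (PySem.List.sorted xs key false).filter p = PySem.List.sorted (xs.filter p) key false := by
  induction xs using List.reverseRecOn with
  | nil => simp [PySem.List.sorted_eq_foldl_insertBy]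
  | append_singleton xs x ih =>
    have hpair : (PySem.List.sorted xs key false).Pairwise (fun a b => key a ≤ key b) :=
      PySem.List.sorted_pairwise xs key
    rw [PySem.List.sorted_eq_foldl_insertBy (xs ++ [x]) key, List.foldl_append]
    rw [← PySem.List.sorted_eq_foldl_insertBy xs key]
    simp only [List.foldl_cons, List.foldl_nil, List.filter_append, List.filter_cons,
      List.filter_nil]
    by_cases hx : p x = true
    · rw [hx, if_pos rfl, filter_insertBy_pos key p x _ hpair hx, ih,
        PySem.List.sorted_eq_foldl_insertBy (xs.filter p ++ [x]) key, List.foldl_append,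
        ← PySem.List.sorted_eq_foldl_insertBy (xs.filter p) key]
      simp
    · rw [eq_false_of_ne_true hx, if_neg (by simp),
        filter_insertBy_neg key p x _ (eq_false_of_ne_true hx), ih]
      simp

-- the single pass, observed at one valid day, is that day's greedy fold
lemma pass_inv (L : List Ev) (d : String) (hd : d ∈ days_order)
    (en : PySem.Dict String Int) (bk : PySem.Dict String (List Ev)) :
    ((L.foldl (passStep (PySem.Set.ofList days_order)) (en, bk)).2.getD d [],
     (L.foldl (passStep (PySem.Set.ofList days_order)) (en, bk)).1.getD d 480)
      = (L.filter (fun e => e.2.1 == d)).foldl oneDay (bk.getD d [], en.getD d 480) := by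
  induction L generalizing en bk with
  | nil => simp
  | cons e L ih =>
    rw [List.foldl_cons, List.filter_cons]
    by_cases hday : e.2.1 = d
    · have hmem : e.2.1 ∈ PySem.Set.ofList days_order := by
        rw [PySem.Set.mem_ofList, hday]; exact hd
      rw [if_pos (by simp [hday])]
      by_cases hc : 480 ≤ to_minutes e.2.2.1 ∧ to_minutes e.2.2.2.1 ≤ 1080
          ∧ en.getD e.2.1 480 ≤ to_minutes e.2.2.1
      · rw [show passStep (PySem.Set.ofList days_order) (en, bk) e
            = (en.insert e.2.1 (to_minutes e.2.2.2.1), bk.modify e.2.1 [] (· ++ [e])) from by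
          simp only [passStep]; rw [if_pos ⟨hmem, hc.1, hc.2.1, hc.2.2⟩]]
        rw [List.foldl_cons,
          show oneDay (bk.getD d [], en.getD d 480) e = (bk.getD d [] ++ [e], to_minutes e.2.2.2.1) from by
            simp only [oneDay]; rw [if_pos ⟨hc.1, hc.2.1, by rw [← hday]; exact hc.2.2⟩],
          ih]
        rw [hday, PySem.Dict.getD_insert, if_pos rfl, PySem.Dict.getD_modify, if_pos rfl]
      · rw [show passStep (PySem.Set.ofList days_order) (en, bk) e = (en, bk) from by
          simp only [passStep]; rw [if_neg (by tauto)]]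
        rw [List.foldl_cons,
          show oneDay (bk.getD d [], en.getD d 480) e = (bk.getD d [], en.getD d 480) from by
            simp only [oneDay]; rw [if_neg (by rw [← hday] at *; tauto)],
          ih]
    · rw [if_neg (by simp [hday])]
      by_cases hc : e.2.1 ∈ PySem.Set.ofList days_order ∧ 480 ≤ to_minutes e.2.2.1
          ∧ to_minutes e.2.2.2.1 ≤ 1080 ∧ en.getD e.2.1 480 ≤ to_minutes e.2.2.1
      · rw [show passStep (PySem.Set.ofList days_order) (en, bk) e
            = (en.insert e.2.1 (to_minutes e.2.2.2.1), bk.modify e.2.1 [] (· ++ [e])) from by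
          simp only [passStep]; rw [if_pos hc]]
        rw [ih, PySem.Dict.getD_insert, if_neg (fun h => hday h.symm),
          PySem.Dict.getD_modify, if_neg (fun h => hday h.symm)]
      · rw [show passStep (PySem.Set.ofList days_order) (en, bk) e = (en, bk) from by
          simp only [passStep]; rw [if_neg hc]]
        exact ih en bk

-- B's bucket at any weekday is A's per-day greedy result
lemma bucket_eq (events : List Ev) (d : String) (hd : d ∈ days_order) :
    (((PySem.List.sorted events (fun ev => to_minutes ev.2.2.2.1) false).foldl
        (passStep (PySem.Set.ofList days_order))
        (PySem.Dict.empty, PySem.Dict.empty)).2.getD d [])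
      = chosenFor events d := by
  have h := pass_inv (PySem.List.sorted events (fun ev => to_minutes ev.2.2.2.1) false) d hd
      PySem.Dict.empty PySem.Dict.empty
  have h1 := congrArg Prod.fst h
  simp only [PySem.Dict.getD_empty] at h1
  rw [h1, filter_sorted, chosenFor]

-- A's per-day result as written in the port (innerStepA, to_minutes (8, 0))
def chosenA (events : List Ev) (day : String) : List Ev :=
  ((PySem.List.sorted (events.filter (fun event => event.2.1 == day))
      (fun event => to_minutes event.2.2.2.1) false).foldl innerStepA ([], to_minutes (8, 0))).1

lemma chosenA_eq (events : List Ev) (day : String) :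
    chosenA events day = chosenFor events day := by
  simp only [chosenA, chosenFor, innerStepA_eq,
    show to_minutes ((8 : Int), (0 : Int)) = 480 from by norm_num [to_minutes]]

-- assembling the final pair from equal per-day results gives equal pairs
lemma assemble_congr (c₁ c₂ : String → List Ev) (days : List String)
    (h : ∀ d ∈ days, c₁ d = c₂ d) :
    (days.flatMap c₁,
     (days.foldl (fun sch day => if c₁ day ≠ [] then sch.insert day (c₁ day) else sch)
        (PySem.Dict.empty : PySem.Dict String (List Ev))).items)
      = (days.flatMap c₂,
         (days.foldl (fun sch day => if c₂ day ≠ [] then sch.insert day (c₂ day) else sch)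
            PySem.Dict.empty).items) := by
  rw [List.flatMap_def, List.flatMap_def, List.map_congr_left h,
    PySem.List.foldl_congr_mem days
      (fun sch day => if c₁ day ≠ [] then sch.insert day (c₁ day) else sch)
      (fun sch day => if c₂ day ≠ [] then sch.insert day (c₂ day) else sch)
      PySem.Dict.empty (fun sch d hd => by simp only [h d hd])]

-- ===== VERDICT (by name: the statement is the Claim_ definition above) =====
theorem greedy_schedule_spec : Claim_equal_greedy_schedule := by
  intro events _hdom
  unfold Spec_greedy_schedule
  have hA : greedy_schedule events
      = ([] ++ days_order.flatMap (chosenA events),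
         (days_order.foldl
            (fun sch day => if chosenA events day ≠ [] then
              sch.insert day (chosenA events day) else sch) PySem.Dict.empty).items) :=
    congrArg (fun (r : List Ev × PySem.Dict String (List Ev)) => (r.1, r.2.items))
      (fold_pair (chosenA events) days_order [] PySem.Dict.empty)
  rw [show chosenA events = chosenFor events from funext (chosenA_eq events)] at hA
  simp only [List.nil_append] at hA
  rw [hA]
  exact (assemble_congr
    (fun day => (((PySem.List.sorted events (fun ev => to_minutes ev.2.2.2.1) false).foldl
        (passStep (PySem.Set.ofList days_order))
        (PySem.Dict.empty, PySem.Dict.empty)).2.getD day []))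
    (chosenFor events) days_order (fun d hd => bucket_eq events d hd)).symm
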